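-- pv_equiv track=rewrite | github.com/Mikel-samir/glyph-svm-trainer | lazyDataset.py | pickdrop
-- ===== SOURCE A (Python) =====
-- def pickdrop(T,labels=[]):
--     """ in : T : tuple with (X,y)
--                 where y is lables
--             lables : lables
--         out : tuple (ds1,ds2)
--                 ds1 : has labels
--                 ds2 : rest
--     """
--     (a,b)=T
--     (X,y)=(a.copy(),b.copy())
--     (X_,y_)=([],[])
--     for l in labels:
--         try :
--             while(l in y ):
--                 i= y.index(l)
--                 y_.append(y[i]);X_.append(X[i])
--                 del(y[i]);del(X[i])
--         except:
--             continue
--     return ((X_,y_),(X,y))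
-- ===== SOURCE B (Python) =====
-- def pickdrop(T, labels=[]):
--     """ in : T : tuple with (X,y)
--                 where y is lables
--             lables : lables
--         out : tuple (ds1,ds2)
--                 ds1 : has labels
--                 ds2 : rest
--     """
--     (X, y) = T
--     wanted = set(labels)
--     groups = {}
--     picked = set()
--     resty = []
--     for i, l in enumerate(y):
--         if l in wanted:
--             groups.setdefault(l, []).append(i)
--             picked.add(i)
--         else:
--             resty.append(l)
--     X_, y_ = [], []
--     for l in labels:
--         for i in groups.pop(l, []):
--             X_.append(X[i])
--             y_.append(l)
--     restX = [x for i, x in enumerate(X) if i not in picked]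
--     return ((X_, y_), (restX, resty))
-- ===== Notes on version B (the rewrite author's own statement) =====
-- stated objective: faster
-- what changed: Replaces the per-label repeated 'l in y' / y.index(l) / del scans with one pass over enumerate(y) building a label->index-list dict, a picked-index set and the rest labels, then emitting groups in labels order and filtering X once by the picked set; Pre_ excludes inputs where a requested label occurs in y at a position >= len(X), where A's bare except silently swallows an IndexError mid-update (y_ gets an entry with no matching X_) while B raises IndexError.
-- outside the precondition, e.g. on pickdrop(([1], [5, 5]), [5]): A returns (([1], [5, 5]), ([], [5])), B raises IndexError; on pickdrop(([], [7]), [7]): A returns (([], [7]), ([], [7])), B raises IndexError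
import Mathlib
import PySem

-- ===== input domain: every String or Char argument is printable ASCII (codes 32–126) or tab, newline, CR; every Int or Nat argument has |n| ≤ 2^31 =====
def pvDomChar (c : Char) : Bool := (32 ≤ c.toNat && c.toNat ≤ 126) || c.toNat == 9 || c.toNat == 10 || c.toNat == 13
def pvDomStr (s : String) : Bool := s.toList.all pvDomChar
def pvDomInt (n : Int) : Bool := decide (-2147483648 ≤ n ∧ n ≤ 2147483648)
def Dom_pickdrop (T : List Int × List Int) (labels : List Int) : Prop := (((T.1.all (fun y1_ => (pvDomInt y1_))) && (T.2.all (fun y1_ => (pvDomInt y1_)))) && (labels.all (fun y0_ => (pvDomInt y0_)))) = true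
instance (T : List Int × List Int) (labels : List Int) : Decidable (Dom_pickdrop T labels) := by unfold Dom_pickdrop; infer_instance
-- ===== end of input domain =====

-- B replaces A's per-label repeated `l in y` / y.index / del scans by one pass over enumerate(y)
-- building a label→index-list dict, a picked-index set and the rest labels, then emitting the
-- groups in labels order and filtering X once by the picked set (objective: faster).

-- ===== PORT A =====
-- inner `while l in y:` loop of A; the `none` branch of `pyGet? X i` is the caught IndexError
-- (bare `except: continue`): y_ has already received y[i], nothing is deleted, the label is abandoned.
def pdInner (l : Int) (X y X_ y_ : List Int) : List Int × List Int × List Int × List Int :=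
  if hmem : l ∈ y then
    match hidx : PySem.List.index? y l with
    | some i =>
      match PySem.List.pyGet? X (i : Int) with
      | some xi =>
          pdInner l (X.eraseIdx i) (y.eraseIdx i) (X_ ++ [xi])
            (y_ ++ [(PySem.List.pyGet? y (i : Int)).getD 0])
      | none => (X, y, X_, y_ ++ [(PySem.List.pyGet? y (i : Int)).getD 0])
    | none => (X, y, X_, y_)  -- unreachable: l ∈ y
  else (X, y, X_, y_)
termination_by y.length
decreasing_by
  obtain ⟨pre, suf, hy, hlen, -⟩ := (PySem.List.index?_eq_some_iff y l i).mp hidx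
  have hi : i < y.length := by subst hy; simp [← hlen]
  simp [List.length_eraseIdx, hi]
  omega

def pickdrop (T : List Int × List Int) (labels : List Int) : (List Int × List Int) × (List Int × List Int) :=
  let X := T.1
  let y := T.2
  let r := labels.foldl
    (fun (s : List Int × List Int × List Int × List Int) l =>
      pdInner l s.1 s.2.1 s.2.2.1 s.2.2.2) (X, y, [], [])
  ((r.2.2.1, r.2.2.2), (r.1, r.2.1))

-- ===== PORT B =====
def pickdrop_alt (T : List Int × List Int) (labels : List Int) : (List Int × List Int) × (List Int × List Int) :=
  let X := T.1
  let y := T.2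
  let wanted : PySem.Set Int := PySem.Set.ofList labels
  -- one pass over enumerate(y): group wanted indices by label, mark them picked, keep rest labels
  let s := (PySem.List.enumerate y).foldl
    (fun (s : PySem.Dict Int (List Int) × PySem.Set Int × List Int) p =>
      if PySem.Set.contains wanted p.2 then
        (s.1.insert p.2 (s.1.getD p.2 [] ++ [p.1]), PySem.Set.add s.2.1 p.1, s.2.2)
      else
        (s.1, s.2.1, s.2.2 ++ [p.2]))
    (PySem.Dict.empty, PySem.Set.empty, [])
  -- emit groups in labels order; pop so a duplicate label contributes nothing
  -- X[i]: `pyGet? … |>.getD 0` — on Pre_ every stored index is < len X, so the getD default is never used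
  let t := labels.foldl
    (fun (t : PySem.Dict Int (List Int) × List Int × List Int) l =>
      let idxs := t.1.getD l []
      (t.1.erase l, t.2.1 ++ idxs.map (fun i => (PySem.List.pyGet? X i).getD 0),
       t.2.2 ++ idxs.map (fun _ => l)))
    (s.1, [], [])
  -- rest items: everything not picked
  let restX := ((PySem.List.enumerate X).filter (fun p => !(PySem.Set.contains s.2.1 p.1))).map Prod.snd
  ((t.2.1, t.2.2), (restX, s.2.2))

-- ===== PRECONDITION & SPEC =====
-- Pre_ excludes inputs where some requested label occurs in y at a position ≥ len(X): there A's bare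
-- `except` silently swallows an IndexError mid-update (y_ gets an entry with no matching X_),
-- while B's index lookup X[i] raises that IndexError.
def Pre_pickdrop (T : List Int × List Int) (labels : List Int) : Prop :=
  ∀ a ∈ T.2.drop T.1.length, a ∉ labels
instance (T : List Int × List Int) (labels : List Int) : Decidable (Pre_pickdrop T labels) := by unfold Pre_pickdrop; infer_instance
def pvWitness_pickdrop : (List Int × List Int) × List Int := (([1, 2, 3], [0, 1, 0]), [0])

def Spec_pickdrop (T : List Int × List Int) (labels : List Int) (out : (List Int × List Int) × (List Int × List Int)) : Prop := out = pickdrop_alt T labels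
instance (T : List Int × List Int) (labels : List Int) (out : (List Int × List Int) × (List Int × List Int)) : Decidable (Spec_pickdrop T labels out) := by unfold Spec_pickdrop; infer_instance

-- ===== CLAIM (what is proved, stated in full; the proofs are below) =====
def Claim_equal_pickdrop : Prop := ∀ (T : List Int × List Int) (labels : List Int), Dom_pickdrop T labels → Pre_pickdrop T labels → Spec_pickdrop T labels (pickdrop T labels)

-- ===== LEMMAS AND PROOFS =====

-- items picked for / kept against one label, over the zipped pairs
def pvPick (l : Int) (P : List (Int × Int)) : List Int := (P.filter (fun p => p.2 == l)).map Prod.fst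
def pvKeep (l : Int) (P : List (Int × Int)) : List (Int × Int) := P.filter (fun p => !(p.2 == l))

-- reference recursion: for each label in order, move its group from P to the accumulators
def pvMid : List Int → List (Int × Int) → List Int → List Int → (List (Int × Int) × List Int × List Int)
  | [], P, aX, aY => (P, aX, aY)
  | l :: ls, P, aX, aY => pvMid ls (pvKeep l P) (aX ++ pvPick l P) (aY ++ (pvPick l P).map (fun _ => l))

lemma pv_zip_maps (Q : List (Int × Int)) : (Q.map Prod.fst).zip (Q.map Prod.snd) = Q := by
  induction Q with
  | nil => rfl
  | cons p t ih => simp [ih]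

lemma pv_get_mid {α : Type} (pre suf : List α) (x : α) :
    (pre ++ x :: suf)[pre.length]'(by simp) = x := by
  induction pre with
  | nil => rfl
  | cons a t ih => simpa using ih

lemma pv_eraseIdx_mid {α : Type} (pre suf : List α) (x : α) :
    (pre ++ x :: suf).eraseIdx pre.length = pre ++ suf := by
  induction pre with
  | nil => rfl
  | cons a t ih => simpa using ih

-- the X/y parts of the zip, completed by the unpaired tails, recover X and y
lemma pv_map_fst_zip_drop (X : List Int) : ∀ (y : List Int),
    (X.zip y).map Prod.fst ++ X.drop y.length = X := by
  induction X with
  | nil => intro y; simp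
  | cons a X ih =>
    intro y
    cases y with
    | nil => simp
    | cons b y => simpa using ih y

lemma pv_map_snd_zip_drop (y : List Int) : ∀ (X : List Int),
    (X.zip y).map Prod.snd ++ y.drop X.length = y := by
  induction y with
  | nil => intro X; simp
  | cons b y ih =>
    intro X
    cases X with
    | nil => simp
    | cons a X => simpa using ih X

-- dropping the shorter-side tail commutes with a synchronized eraseIdx
lemma pv_drop_erase (X y : List Int) (i : Nat) (hiX : i < X.length) (hiY : i < y.length) :
    (X.eraseIdx i).drop ((y.eraseIdx i).length) = X.drop y.length := by
  have h1 : (y.eraseIdx i).length = y.length - 1 := by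
    simp [List.length_eraseIdx, hiY]
  have h2 : (X.take i).length = i := by simp [Nat.le_of_lt hiX]
  rw [h1, List.eraseIdx_eq_take_drop_succ X i, List.drop_append, h2,
      List.drop_eq_nil_of_le (le_trans (List.length_take_le _ _) (by omega)),
      List.drop_drop,
      show i + 1 + (y.length - 1 - i) = y.length by omega]
  simp

lemma pdInner_eq (l : Int) : ∀ (n : Nat) (X y X_ y_ : List Int), y.length = n →
    (∀ (j : Nat) (h : j < y.length), y[j] = l → j < X.length) →
    pdInner l X y X_ y_ =
      ((pvKeep l (X.zip y)).map Prod.fst ++ X.drop y.length,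
       (pvKeep l (X.zip y)).map Prod.snd ++ y.drop X.length,
       X_ ++ pvPick l (X.zip y), y_ ++ (pvPick l (X.zip y)).map (fun _ => l)) := by
  intro n
  induction n using Nat.strong_induction_on with
  | _ n IH =>
    intro X y X_ y_ hn H
    rw [pdInner]
    by_cases hmem : l ∈ y
    · rw [dif_pos hmem]
      split
      case _ i hidx =>
        obtain ⟨pre, suf, hy, hplen, hnotpre⟩ := (PySem.List.index?_eq_some_iff y l i).mp hidx
        subst hplen
        have hiY : pre.length < y.length := by subst hy; simp
        have hygetl : y[pre.length]'hiY = l := by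
          subst hy; exact pv_get_mid pre suf l
        have hiX : pre.length < X.length := H pre.length hiY hygetl
        have hlenp : (X.take pre.length).length = pre.length := by
          simp [List.length_take, Nat.le_of_lt hiX]
        have hyget : PySem.List.pyGet? y (pre.length : Int) = some l := by
          rw [PySem.List.pyGet?_ofNat y pre.length hiY]
          exact congrArg some hygetl
        have hXd : X = X.take pre.length ++ X[pre.length] :: X.drop (pre.length + 1) := by
          conv_lhs => rw [← List.take_append_drop pre.length X, ← List.getElem_cons_drop hiX]
        have hzip : X.zip y = (X.take pre.length).zip pre ++ (X[pre.length], l) :: (X.drop (pre.length + 1)).zip suf := by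
          conv_lhs => rw [hXd, hy]
          rw [List.zip_append hlenp]
          rfl
        have hyerase : y.eraseIdx pre.length = pre ++ suf := by
          subst hy; exact pv_eraseIdx_mid pre suf l
        have hXerase : X.eraseIdx pre.length = X.take pre.length ++ X.drop (pre.length + 1) :=
          List.eraseIdx_eq_take_drop_succ X pre.length
        have hzip' : (X.eraseIdx pre.length).zip (y.eraseIdx pre.length) =
            (X.take pre.length).zip pre ++ (X.drop (pre.length + 1)).zip suf := by
          rw [hXerase, hyerase, List.zip_append hlenp]
        have hpreK : ∀ p ∈ (X.take pre.length).zip pre, (!(p.2 == l)) = true := by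
          rintro ⟨a, b⟩ hp
          have hb : b ∈ pre := (List.of_mem_zip hp).2
          have hbl : ¬ b = l := fun e => hnotpre (e ▸ hb)
          simp [hbl]
        have hkeep : pvKeep l (X.zip y) = (X.take pre.length).zip pre ++ pvKeep l ((X.drop (pre.length + 1)).zip suf) := by
          rw [hzip]
          simp only [pvKeep, List.filter_append, List.filter_cons]
          rw [List.filter_eq_self.mpr hpreK]
          simp
        have hkeep' : pvKeep l ((X.eraseIdx pre.length).zip (y.eraseIdx pre.length)) =
            (X.take pre.length).zip pre ++ pvKeep l ((X.drop (pre.length + 1)).zip suf) := by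
          rw [hzip']
          simp only [pvKeep, List.filter_append]
          rw [List.filter_eq_self.mpr hpreK]
        have hpreP : ((X.take pre.length).zip pre).filter (fun p => p.2 == l) = [] := by
          refine List.filter_eq_nil_iff.mpr ?_
          rintro ⟨a, b⟩ hp
          have hb : b ∈ pre := (List.of_mem_zip hp).2
          have hbl : ¬ b = l := fun e => hnotpre (e ▸ hb)
          simp [hbl]
        have hpick : pvPick l (X.zip y) = X[pre.length] :: pvPick l ((X.drop (pre.length + 1)).zip suf) := by
          rw [hzip]
          simp only [pvPick, List.filter_append, List.filter_cons, hpreP]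
          simp
        have hpick' : pvPick l ((X.eraseIdx pre.length).zip (y.eraseIdx pre.length)) =
            pvPick l ((X.drop (pre.length + 1)).zip suf) := by
          rw [hzip']
          simp only [pvPick, List.filter_append, hpreP]
          simp
        have hm : (y.eraseIdx pre.length).length < n := by
          rw [← hn]
          simp [List.length_eraseIdx, hiY]
          omega
        have hXlen' : (X.eraseIdx pre.length).length = X.length - 1 := by
          simp [List.length_eraseIdx, hiX]
        have H' : ∀ (j : Nat) (h : j < (y.eraseIdx pre.length).length),
            (y.eraseIdx pre.length)[j] = l → j < (X.eraseIdx pre.length).length := by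
          intro j hj hjl
          have hjY : j < y.length - 1 := by
            simpa [List.length_eraseIdx, hiY] using hj
          by_cases hlt : j < pre.length
          · exfalso
            have hyj : y[j]'(by omega) = pre[j]'(by omega) := by
              subst hy
              exact List.getElem_append_left (by omega : j < pre.length)
            rw [List.getElem_eraseIdx_of_lt hj hlt, hyj] at hjl
            exact hnotpre (hjl ▸ List.getElem_mem _)
          · have hj1 : j + 1 < y.length := by omega
            have hval : y[j + 1]'hj1 = l := by
              rw [List.getElem_eraseIdx_of_ge hj (by omega : pre.length ≤ j)] at hjl
              exact hjl
            have := H (j + 1) hj1 hval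
            omega
        have hdropX : (X.eraseIdx pre.length).drop ((y.eraseIdx pre.length).length) = X.drop y.length :=
          pv_drop_erase X y pre.length hiX hiY
        have hdropY : (y.eraseIdx pre.length).drop ((X.eraseIdx pre.length).length) = y.drop X.length :=
          pv_drop_erase y X pre.length hiY hiX
        split
        case _ xi hget =>
          have hxi : xi = X[pre.length] := by
            rw [PySem.List.pyGet?_ofNat X pre.length hiX] at hget
            injection hget with h
            exact h.symm
          rw [IH (y.eraseIdx pre.length).length hm (X.eraseIdx pre.length) (y.eraseIdx pre.length) _ _ rfl H']
          rw [hkeep', hkeep, hpick', hpick, hyget, hxi, hdropX, hdropY]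
          simp [List.append_assoc]
        case _ hget =>
          rw [PySem.List.pyGet?_ofNat X pre.length hiX] at hget
          exact absurd hget (by simp)
      case _ hidx =>
        exact absurd ((PySem.List.index?_eq_none_iff y l).mp hidx) (by simpa using hmem)
    · rw [dif_neg hmem]
      have hknone : pvKeep l (X.zip y) = X.zip y := by
        refine List.filter_eq_self.mpr ?_
        rintro ⟨a, b⟩ hp
        have hb : b ∈ y := (List.of_mem_zip hp).2
        have : ¬ b = l := fun e => hmem (e ▸ hb)
        simp [this]
      have hpnone : pvPick l (X.zip y) = [] := by
        refine List.map_eq_nil_iff.mpr (List.filter_eq_nil_iff.mpr ?_)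
        rintro ⟨a, b⟩ hp
        have hb : b ∈ y := (List.of_mem_zip hp).2
        have : ¬ b = l := fun e => hmem (e ▸ hb)
        simp [this]
      rw [hknone, hpnone]
      rw [pv_map_fst_zip_drop, pv_map_snd_zip_drop]
      simp

-- each zip tail is empty on one side, so the unpaired tails never pair up
lemma pv_zip_drops (X y : List Int) : (X.drop y.length).zip (y.drop X.length) = [] := by
  rcases le_total X.length y.length with h | h
  · rw [List.drop_eq_nil_of_le h]
    simp
  · rw [List.drop_eq_nil_of_le h]
    simp

lemma pv_drop_of_drops (X y : List Int) :
    (X.drop y.length).drop ((y.drop X.length).length) = X.drop y.length := by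
  rcases le_total X.length y.length with h | h
  · rw [List.drop_eq_nil_of_le h]; simp
  · have hnil : y.drop X.length = [] := List.drop_eq_nil_of_le h
    rw [hnil]; simp

lemma pv_foldA (ls : List Int) : ∀ (X y X_ y_ : List Int),
    (∀ a ∈ y.drop X.length, a ∉ ls) →
    ls.foldl (fun (s : List Int × List Int × List Int × List Int) l =>
        pdInner l s.1 s.2.1 s.2.2.1 s.2.2.2) (X, y, X_, y_) =
      ((pvMid ls (X.zip y) X_ y_).1.map Prod.fst ++ X.drop y.length,
       (pvMid ls (X.zip y) X_ y_).1.map Prod.snd ++ y.drop X.length,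
       (pvMid ls (X.zip y) X_ y_).2.1, (pvMid ls (X.zip y) X_ y_).2.2) := by
  induction ls with
  | nil =>
    intro X y X_ y_ _
    simp only [List.foldl_nil, pvMid]
    rw [pv_map_fst_zip_drop, pv_map_snd_zip_drop]
  | cons l ls ih =>
    intro X y X_ y_ Hall
    have Hl : ∀ (j : Nat) (h : j < y.length), y[j] = l → j < X.length := by
      intro j hj hjl
      by_contra hge
      have hge' : X.length ≤ j := by omega
      have hlt : j - X.length < (y.drop X.length).length := by
        simp only [List.length_drop]; omega
      have hmem : y[j] ∈ y.drop X.length := by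
        have he : (y.drop X.length)[j - X.length]'hlt = y[j]'hj := by
          rw [List.getElem_drop]
          congr 1
          omega
        exact he ▸ List.getElem_mem _
      exact Hall _ hmem (by rw [hjl]; exact List.mem_cons_self)
    simp only [List.foldl_cons]
    rw [pdInner_eq l y.length X y X_ y_ rfl Hl]
    have hKlen : ((pvKeep l (X.zip y)).map Prod.fst).length = ((pvKeep l (X.zip y)).map Prod.snd).length := by
      simp
    have Hall' : ∀ a ∈ ((pvKeep l (X.zip y)).map Prod.snd ++ y.drop X.length).drop
        ((pvKeep l (X.zip y)).map Prod.fst ++ X.drop y.length).length, a ∉ ls := by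
      intro a ha
      rw [List.drop_append] at ha
      rw [List.drop_eq_nil_of_le (by simp)] at ha
      simp only [List.nil_append] at ha
      exact fun hl => Hall a (List.mem_of_mem_drop ha) (List.mem_cons_of_mem l hl)
    rw [ih _ _ _ _ Hall']
    have e1 : ((pvKeep l (X.zip y)).map Prod.fst ++ X.drop y.length).zip
        ((pvKeep l (X.zip y)).map Prod.snd ++ y.drop X.length) = pvKeep l (X.zip y) := by
      rw [List.zip_append hKlen, pv_zip_maps, pv_zip_drops]
      simp
    have e2 : ((pvKeep l (X.zip y)).map Prod.fst ++ X.drop y.length).drop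
        ((pvKeep l (X.zip y)).map Prod.snd ++ y.drop X.length).length = X.drop y.length := by
      rw [List.drop_append, List.drop_eq_nil_of_le (by simp)]
      simp only [List.nil_append, List.length_append, List.length_map, Nat.add_sub_cancel_left]
      exact pv_drop_of_drops X y
    have e3 : ((pvKeep l (X.zip y)).map Prod.snd ++ y.drop X.length).drop
        ((pvKeep l (X.zip y)).map Prod.fst ++ X.drop y.length).length = y.drop X.length := by
      rw [List.drop_append, List.drop_eq_nil_of_le (by simp)]
      simp only [List.nil_append, List.length_append, List.length_map, Nat.add_sub_cancel_left]
      exact pv_drop_of_drops y X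
    rw [e1, e2, e3]
    simp [pvMid]

lemma pv_mid_fst (ls : List Int) : ∀ (P : List (Int × Int)) (aX aY : List Int),
    (pvMid ls P aX aY).1 = P.filter (fun p => !(ls.contains p.2)) := by
  induction ls with
  | nil => intro P aX aY; simp [pvMid]
  | cons l ls ih =>
    intro P aX aY
    simp only [pvMid, ih, pvKeep, List.filter_filter]
    apply List.filter_congr
    intro p _
    simp only [List.contains_cons]
    cases h : p.2 == l <;> simp [h]

lemma pv_pick_keep_self (l : Int) (P : List (Int × Int)) : pvPick l (pvKeep l P) = [] := by
  simp only [pvPick, pvKeep, List.filter_filter]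
  have : ∀ p ∈ P, ((p.2 == l) && !(p.2 == l)) = false := by intro p _; cases h : p.2 == l <;> simp [h]
  rw [List.filter_congr this]
  simp

lemma pv_pick_keep_ne (k l : Int) (h : ¬ k = l) (P : List (Int × Int)) :
    pvPick k (pvKeep l P) = pvPick k P := by
  simp only [pvPick, pvKeep, List.filter_filter]
  congr 1
  apply List.filter_congr
  intro p _
  cases hk : p.2 == k
  · simp [hk]
  · have : p.2 = k := by simpa using hk
    simp [hk, this, h]

lemma pv_find?_filter_self (xs : List (Int × List Int)) (k : Int) :
    (xs.filter (fun p => !(p.1 == k))).find? (fun p => p.1 == k) = none := by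
  induction xs with
  | nil => rfl
  | cons p t ih =>
    by_cases h : p.1 = k
    · simp [List.filter_cons, h, ih]
    · simp [List.filter_cons, h, List.find?_cons, ih]

lemma pv_find?_filter_ne (xs : List (Int × List Int)) (k k' : Int) (h : ¬ k' = k) :
    (xs.filter (fun p => !(p.1 == k))).find? (fun p => p.1 == k') = xs.find? (fun p => p.1 == k') := by
  induction xs with
  | nil => rfl
  | cons p t ih =>
    by_cases hk : p.1 = k
    · have hne : (k == k') = false := beq_eq_false_iff_ne.mpr (fun e => h e.symm)
      simp [List.filter_cons, hk, List.find?_cons, hne, ih]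
    · by_cases hk' : p.1 = k'
      · simp [List.filter_cons, hk, List.find?_cons, hk', h]
      · simp [List.filter_cons, hk, List.find?_cons, hk', ih]

lemma pv_getD_erase_self (d : PySem.Dict Int (List Int)) (k : Int) :
    (d.erase k).getD k [] = [] := by
  simp only [PySem.Dict.erase, PySem.Dict.getD, PySem.Dict.get?]
  rw [pv_find?_filter_self]
  rfl

lemma pv_getD_erase_ne (d : PySem.Dict Int (List Int)) (k k' : Int) (h : ¬ k' = k) :
    (d.erase k).getD k' [] = d.getD k' [] := by
  simp only [PySem.Dict.erase, PySem.Dict.getD, PySem.Dict.get?]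
  rw [pv_find?_filter_ne _ _ _ h]

-- ==== phase 1 of B: one pass over enumerate(y) ====

lemma pv_phase1_getD (W : PySem.Set Int) :
    ∀ (E : List (Int × Int)) (st : PySem.Dict Int (List Int) × PySem.Set Int × List Int) (k : Int),
    PySem.Set.contains W k = true →
    (E.foldl (fun s p =>
        if PySem.Set.contains W p.2 then
          (s.1.insert p.2 (s.1.getD p.2 [] ++ [p.1]), PySem.Set.add s.2.1 p.1, s.2.2)
        else (s.1, s.2.1, s.2.2 ++ [p.2])) st).1.getD k [] =
      st.1.getD k [] ++ (E.filter (fun p => p.2 == k)).map Prod.fst := by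
  intro E
  induction E with
  | nil => intro st k hk; simp
  | cons p E ih =>
    intro st k hk
    simp only [List.foldl_cons]
    by_cases hc : PySem.Set.contains W p.2
    · rw [if_pos hc, ih _ k hk]
      by_cases hpk : p.2 = k
      · subst hpk
        rw [PySem.Dict.getD_insert]
        simp [List.filter_cons, List.append_assoc]
      · rw [PySem.Dict.getD_insert]
        have : ¬ k = p.2 := fun e => hpk e.symm
        rw [if_neg this]
        have hb : (p.2 == k) = false := beq_eq_false_iff_ne.mpr hpk
        simp [List.filter_cons, hb]
    · rw [if_neg hc, ih _ k hk]
      have hpk : (p.2 == k) = false := by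
        refine beq_eq_false_iff_ne.mpr (fun e => hc ?_)
        rw [e]; exact hk
      simp [List.filter_cons, hpk]

lemma pv_phase1_rest (W : PySem.Set Int) :
    ∀ (E : List (Int × Int)) (st : PySem.Dict Int (List Int) × PySem.Set Int × List Int),
    (E.foldl (fun s p =>
        if PySem.Set.contains W p.2 then
          (s.1.insert p.2 (s.1.getD p.2 [] ++ [p.1]), PySem.Set.add s.2.1 p.1, s.2.2)
        else (s.1, s.2.1, s.2.2 ++ [p.2])) st).2.2 =
      st.2.2 ++ (E.filter (fun p => !(PySem.Set.contains W p.2))).map Prod.snd := by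
  intro E
  induction E with
  | nil => intro st; simp
  | cons p E ih =>
    intro st
    simp only [List.foldl_cons]
    by_cases hc : PySem.Set.contains W p.2
    · rw [if_pos hc, ih]
      have hm : p.2 ∈ W := (PySem.Set.contains_iff W p.2).mp hc
      simp [List.filter_cons, hm]
    · rw [if_neg hc, ih]
      have hm : p.2 ∉ W := fun hm => hc ((PySem.Set.contains_iff W p.2).mpr hm)
      simp [List.filter_cons, hm, List.append_assoc]

lemma pv_phase1_picked (W : PySem.Set Int) :
    ∀ (E : List (Int × Int)) (st : PySem.Dict Int (List Int) × PySem.Set Int × List Int) (j : Int),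
    j ∈ (E.foldl (fun s p =>
        if PySem.Set.contains W p.2 then
          (s.1.insert p.2 (s.1.getD p.2 [] ++ [p.1]), PySem.Set.add s.2.1 p.1, s.2.2)
        else (s.1, s.2.1, s.2.2 ++ [p.2])) st).2.1 ↔
      j ∈ st.2.1 ∨ ∃ p ∈ E, PySem.Set.contains W p.2 = true ∧ p.1 = j := by
  intro E
  induction E with
  | nil => intro st j; simp
  | cons p E ih =>
    intro st j
    simp only [List.foldl_cons]
    by_cases hc : PySem.Set.contains W p.2
    · rw [if_pos hc, ih]
      rw [PySem.Set.mem_add]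
      constructor
      · rintro (⟨h | h⟩ | ⟨q, hq, hw, hj⟩)
        · exact Or.inl h
        · exact Or.inr ⟨p, by simp, hc, h.symm⟩
        · exact Or.inr ⟨q, by simp [hq], hw, hj⟩
      · rintro (h | ⟨q, hq, hw, hj⟩)
        · exact Or.inl (Or.inl h)
        · rcases List.mem_cons.mp hq with rfl | hq'
          · exact Or.inl (Or.inr hj.symm)
          · exact Or.inr ⟨q, hq', hw, hj⟩
    · rw [if_neg hc, ih]
      constructor
      · rintro (h | ⟨q, hq, hw, hj⟩)
        · exact Or.inl h
        · exact Or.inr ⟨q, by simp [hq], hw, hj⟩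
      · rintro (h | ⟨q, hq, hw, hj⟩)
        · exact Or.inl h
        · rcases List.mem_cons.mp hq with rfl | hq'
          · exact absurd hw (by simpa using hc)
          · exact Or.inr ⟨q, hq', hw, hj⟩

-- ==== phase 2 of B: emit groups in labels order ====

lemma pv_phase2 (gX : Int → Int) (ls : List Int) :
    ∀ (d : PySem.Dict Int (List Int)) (P : List (Int × Int)) (aX aY : List Int),
    (∀ k ∈ ls, (d.getD k []).map gX = pvPick k P) →
    (ls.foldl (fun (t : PySem.Dict Int (List Int) × List Int × List Int) l =>
        let idxs := t.1.getD l []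
        (t.1.erase l, t.2.1 ++ idxs.map gX, t.2.2 ++ idxs.map (fun _ => l))) (d, aX, aY)).2 =
      ((pvMid ls P aX aY).2.1, (pvMid ls P aX aY).2.2) := by
  induction ls with
  | nil => intro d P aX aY H; simp [pvMid]
  | cons l ls ih =>
    intro d P aX aY H
    simp only [List.foldl_cons]
    have hmap : (d.getD l []).map gX = pvPick l P := H l (by simp)
    have hconst : (d.getD l []).map (fun _ => l) = (pvPick l P).map (fun _ => l) := by
      have hlen : (d.getD l []).length = (pvPick l P).length := by
        rw [← hmap]; simp
      simp only [List.map_const']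
      rw [hlen]
    rw [ih (d.erase l) (pvKeep l P) _ _ ?_]
    · simp only [hmap, hconst, pvMid]
    · intro k hk
      by_cases hkl : k = l
      · subst hkl; rw [pv_getD_erase_self, pv_pick_keep_self]; simp
      · rw [pv_getD_erase_ne _ _ _ hkl, H k (by simp [hk]), pv_pick_keep_ne _ _ hkl]

-- ==== bridging enumerate(y) to X.zip y ====

lemma pv_zip_take_both (X : List Int) : ∀ (y : List Int),
    X.zip y = (X.take y.length).zip (y.take X.length) := by
  induction X with
  | nil => intro y; simp
  | cons a X ih =>
    intro y
    cases y with
    | nil => simp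
    | cons b y => simpa using ih y

lemma pv_zip_take_right (X : List Int) : ∀ (y : List Int),
    X.zip y = X.zip (y.take X.length) := by
  induction X with
  | nil => intro y; simp
  | cons a X ih =>
    intro y
    cases y with
    | nil => simp
    | cons b y => simpa using ih y

lemma pv_zip_eq_map_enum (X : List Int) (ys : List Int) (h : ys.length ≤ X.length) :
    X.zip ys = (PySem.List.enumerate ys).map
      (fun p => ((PySem.List.pyGet? X p.1).getD 0, p.2)) := by
  apply List.ext_getElem
  · simp [PySem.List.length_enumerate]
    omega
  · intro k h1 h2
    have hkY : k < ys.length := by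
      simp at h1
      omega
    have hkX : k < X.length := lt_of_lt_of_le hkY h
    rw [List.getElem_zip, List.getElem_map, PySem.List.getElem_enumerate]
    simp [PySem.List.pyGet?_ofNat X k hkX]

-- wanted label k never occurs in the unpaired tail of y, so its picks are exactly the zip's
lemma pv_pick_enum (X y : List Int) (k : Int) (hk : k ∉ y.drop X.length) :
    ((PySem.List.enumerate y).filter (fun p => p.2 == k)).map
        (fun p => (PySem.List.pyGet? X p.1).getD 0) = pvPick k (X.zip y) := by
  have hsplit : PySem.List.enumerate y = PySem.List.enumerate (y.take X.length) ++
      PySem.List.enumerate (y.drop X.length) (0 + ((y.take X.length).length : Int)) := by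
    conv_lhs => rw [← List.take_append_drop X.length y]
    exact PySem.List.enumerate_append _ _ _
  have htail : (PySem.List.enumerate (y.drop X.length) (0 + ((y.take X.length).length : Int))).filter
      (fun p => p.2 == k) = [] := by
    refine List.filter_eq_nil_iff.mpr ?_
    intro p hp
    obtain ⟨j, hj, rfl⟩ := (PySem.List.mem_enumerate_iff _ _ _).mp hp
    have hmem : (y.drop X.length)[j] ∈ y.drop X.length := List.getElem_mem _
    show ¬(((y.drop X.length)[j] == k) = true)
    simp only [beq_iff_eq]
    exact fun e => hk (e ▸ hmem)
  have hle : (y.take X.length).length ≤ X.length := by simp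
  rw [hsplit, List.filter_append, htail, List.append_nil]
  rw [pv_zip_take_right X y, pv_zip_eq_map_enum X (y.take X.length) hle]
  unfold pvPick
  rw [List.filter_map, List.map_map]
  rfl

lemma pv_resty_enum (W : PySem.Set Int) (X y : List Int)
    (Hall : ∀ a ∈ y.drop X.length, PySem.Set.contains W a = false) :
    ((PySem.List.enumerate y).filter (fun p => !(PySem.Set.contains W p.2))).map Prod.snd =
      ((X.zip y).filter (fun p => !(PySem.Set.contains W p.2))).map Prod.snd ++ y.drop X.length := by
  have hsplit : PySem.List.enumerate y = PySem.List.enumerate (y.take X.length) ++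
      PySem.List.enumerate (y.drop X.length) (0 + ((y.take X.length).length : Int)) := by
    conv_lhs => rw [← List.take_append_drop X.length y]
    exact PySem.List.enumerate_append _ _ _
  have htail : (PySem.List.enumerate (y.drop X.length) (0 + ((y.take X.length).length : Int))).filter
      (fun p => !(PySem.Set.contains W p.2)) =
      PySem.List.enumerate (y.drop X.length) (0 + ((y.take X.length).length : Int)) := by
    refine List.filter_eq_self.mpr ?_
    intro p hp
    obtain ⟨j, hj, rfl⟩ := (PySem.List.mem_enumerate_iff _ _ _).mp hp
    have hc : PySem.Set.contains W ((y.drop X.length)[j]) = false := Hall _ (List.getElem_mem _)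
    show (!(PySem.Set.contains W ((y.drop X.length)[j]))) = true
    rw [hc]
    rfl
  have hle : (y.take X.length).length ≤ X.length := by simp
  rw [hsplit, List.filter_append, htail, List.map_append, PySem.List.map_snd_enumerate]
  rw [pv_zip_take_right X y, pv_zip_eq_map_enum X (y.take X.length) hle]
  rw [List.filter_map, List.map_map]
  rfl

lemma pv_restAux (Q : Int → Bool) : ∀ (xs ys : List Int) (s : Int) (pk : Int → Bool),
    xs.length = ys.length →
    (∀ (i : Nat) (h : i < ys.length), pk (s + i) = Q ys[i]) →
    ((PySem.List.enumerate xs s).filter (fun p => !(pk p.1))).map Prod.snd =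
      ((xs.zip ys).filter (fun p => !(Q p.2))).map Prod.fst := by
  intro xs
  induction xs with
  | nil =>
    intro ys s pk hlen _
    have : ys = [] := List.eq_nil_of_length_eq_zero (by simpa using hlen.symm)
    subst this
    simp [PySem.List.enumerate]
  | cons x xs ih =>
    intro ys s pk hlen hpk
    cases ys with
    | nil => simp at hlen
    | cons b ys =>
      have h0 : pk s = Q b := by
        have := hpk 0 (by simp)
        simpa using this
      have hrec := ih ys (s + 1) pk (by simpa using hlen) ?_
      · rw [PySem.List.enumerate_cons]
        simp only [List.zip_cons_cons, List.filter_cons, h0]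
        cases hq : Q b <;> simp [hq, hrec]
      · intro i h
        have := hpk (i + 1) (by simpa using Nat.succ_lt_succ h)
        have harith : s + ((i + 1 : Nat) : Int) = s + 1 + (i : Int) := by
          push_cast
          ring
        rw [harith] at this
        simpa using this

-- the rest of X: everything whose index was not picked
lemma pv_restX (X y : List Int) (labels : List Int)
    (Hall : ∀ a ∈ y.drop X.length, a ∉ labels) :
    ((PySem.List.enumerate X).filter (fun p =>
        !(PySem.Set.contains ((PySem.List.enumerate y).foldl
            (fun (s : PySem.Dict Int (List Int) × PySem.Set Int × List Int) p =>
              if PySem.Set.contains (PySem.Set.ofList labels) p.2 then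
                (s.1.insert p.2 (s.1.getD p.2 [] ++ [p.1]), PySem.Set.add s.2.1 p.1, s.2.2)
              else (s.1, s.2.1, s.2.2 ++ [p.2]))
            (PySem.Dict.empty, PySem.Set.empty, [])).2.1 p.1))).map Prod.snd =
      ((X.zip y).filter (fun p => !(PySem.Set.contains (PySem.Set.ofList labels) p.2))).map Prod.fst
        ++ X.drop y.length := by
  set W := PySem.Set.ofList labels with hWdef
  set picked := ((PySem.List.enumerate y).foldl
      (fun (s : PySem.Dict Int (List Int) × PySem.Set Int × List Int) p =>
        if PySem.Set.contains W p.2 then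
          (s.1.insert p.2 (s.1.getD p.2 [] ++ [p.1]), PySem.Set.add s.2.1 p.1, s.2.2)
        else (s.1, s.2.1, s.2.2 ++ [p.2]))
      (PySem.Dict.empty, PySem.Set.empty, [])).2.1 with hpicked
  -- membership in the picked set, as a closed condition on the index
  have hmemP : ∀ (j : Int), j ∈ picked ↔ ∃ (k : Nat), ∃ (h : k < y.length),
      PySem.Set.contains W y[k] = true ∧ (k : Int) = j := by
    intro j
    rw [hpicked, pv_phase1_picked]
    constructor
    · rintro (h | ⟨p, hp, hw, hj⟩)
      · simp [PySem.Set.empty] at h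
      · obtain ⟨k, hk, rfl⟩ := (PySem.List.mem_enumerate_iff _ _ _).mp hp
        exact ⟨k, hk, hw, by simpa using hj⟩
    · rintro ⟨k, hk, hw, hj⟩
      exact Or.inr ⟨((k : Int), y[k]), (PySem.List.mem_enumerate_iff _ _ _).mpr ⟨k, hk, by simp⟩, hw, hj⟩
  have hsplit : PySem.List.enumerate X = PySem.List.enumerate (X.take y.length) ++
      PySem.List.enumerate (X.drop y.length) (0 + ((X.take y.length).length : Int)) := by
    conv_lhs => rw [← List.take_append_drop y.length X]
    exact PySem.List.enumerate_append _ _ _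
  -- indices at or beyond min(len X, len y) are never picked
  have hnotpicked : ∀ (j : Int), ((X.take y.length).length : Int) ≤ j →
      PySem.Set.contains picked j = false := by
    intro j hj
    cases hc : PySem.Set.contains picked j
    · rfl
    · exfalso
      obtain ⟨k, hk, hw, hkj⟩ := (hmemP j).mp ((PySem.Set.contains_iff _ _).mp hc)
      subst hkj
      have hkm : (X.take y.length).length ≤ k := by exact_mod_cast hj
      have hkX : X.length ≤ k := by
        simp only [List.length_take] at hkm
        omega
      have hlt : k - X.length < (y.drop X.length).length := by
        simp only [List.length_drop]; omega
      have hdmem : y[k] ∈ y.drop X.length := by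
        have he : (y.drop X.length)[k - X.length]'hlt = y[k]'hk := by
          rw [List.getElem_drop]; congr 1; omega
        exact he ▸ List.getElem_mem _
      have : y[k] ∉ labels := Hall _ hdmem
      exact this ((PySem.Set.mem_ofList _ _).mp ((PySem.Set.contains_iff _ _).mp hw))
  have htail : (PySem.List.enumerate (X.drop y.length) (0 + ((X.take y.length).length : Int))).filter
      (fun p => !(PySem.Set.contains picked p.1)) =
      PySem.List.enumerate (X.drop y.length) (0 + ((X.take y.length).length : Int)) := by
    refine List.filter_eq_self.mpr ?_
    intro p hp
    obtain ⟨k, hk, rfl⟩ := (PySem.List.mem_enumerate_iff _ _ _).mp hp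
    rw [hnotpicked (0 + ((X.take y.length).length : Int) + (k : Int)) (by omega)]
    rfl
  have hlen : (X.take y.length).length = (y.take X.length).length := by
    simp only [List.length_take]
    omega
  have hpk : ∀ (i : Nat) (h : i < (y.take X.length).length),
      PySem.Set.contains picked ((0 : Int) + (i : Nat)) = PySem.Set.contains W (y.take X.length)[i] := by
    intro i hi
    have hiY : i < y.length := by
      simp only [List.length_take] at hi
      omega
    have hyt : (y.take X.length)[i]'hi = y[i]'hiY := List.getElem_take
    rw [hyt]
    cases hw : PySem.Set.contains W y[i]
    · cases hc : PySem.Set.contains picked ((0 : Int) + (i : Nat))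
      · rfl
      · exfalso
        obtain ⟨k, hk, hw', hkj⟩ := (hmemP _).mp ((PySem.Set.contains_iff _ _).mp hc)
        have : k = i := by omega
        subst this
        rw [hw'] at hw
        exact absurd hw (by simp)
    · exact (PySem.Set.contains_iff _ _).mpr ((hmemP _).mpr ⟨i, hiY, hw, by omega⟩)
  have hhead := pv_restAux (fun a => PySem.Set.contains W a) (X.take y.length) (y.take X.length)
      0 (fun j => PySem.Set.contains picked j) hlen hpk
  rw [hsplit, List.filter_append, htail, List.map_append, PySem.List.map_snd_enumerate,
      hhead, ← pv_zip_take_both]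

lemma pv_A_eq (X y : List Int) (labels : List Int)
    (Hall : ∀ a ∈ y.drop X.length, a ∉ labels) :
    pickdrop (X, y) labels =
      (((pvMid labels (X.zip y) [] []).2.1, (pvMid labels (X.zip y) [] []).2.2),
       ((X.zip y).filter (fun p => !(labels.contains p.2))).map Prod.fst ++ X.drop y.length,
       ((X.zip y).filter (fun p => !(labels.contains p.2))).map Prod.snd ++ y.drop X.length) := by
  unfold pickdrop
  dsimp only
  rw [pv_foldA labels X y [] [] Hall, pv_mid_fst]

lemma pv_B_eq (X y : List Int) (labels : List Int)
    (Hall : ∀ a ∈ y.drop X.length, a ∉ labels) :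
    pickdrop_alt (X, y) labels =
      (((pvMid labels (X.zip y) [] []).2.1, (pvMid labels (X.zip y) [] []).2.2),
       ((X.zip y).filter (fun p => !(labels.contains p.2))).map Prod.fst ++ X.drop y.length,
       ((X.zip y).filter (fun p => !(labels.contains p.2))).map Prod.snd ++ y.drop X.length) := by
  have hfc : ∀ (f : Int × Int → Int), ((X.zip y).filter (fun p => !(PySem.Set.contains (PySem.Set.ofList labels) p.2))).map f =
      ((X.zip y).filter (fun p => !(labels.contains p.2))).map f := by
    intro f
    congr 1
    apply List.filter_congr
    intro p _
    by_cases hp : p.2 ∈ labels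
    · have h1 : PySem.Set.contains (PySem.Set.ofList labels) p.2 = true :=
        (PySem.Set.contains_iff _ _).mpr ((PySem.Set.mem_ofList _ _).mpr hp)
      simp [h1, hp]
    · have h1 : PySem.Set.contains (PySem.Set.ofList labels) p.2 = false := by
        simpa using fun hm => hp ((PySem.Set.mem_ofList _ _).mp ((PySem.Set.contains_iff _ _).mpr hm |> (PySem.Set.contains_iff _ _).mp))
      simp [h1, hp]
  have hWf : ∀ a ∈ y.drop X.length, PySem.Set.contains (PySem.Set.ofList labels) a = false := by
    intro a ha
    cases hc : PySem.Set.contains (PySem.Set.ofList labels) a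
    · rfl
    · exact absurd ((PySem.Set.mem_ofList _ _).mp ((PySem.Set.contains_iff _ _).mp hc)) (Hall a ha)
  unfold pickdrop_alt
  dsimp only
  have H : ∀ k ∈ labels, ((((PySem.List.enumerate y).foldl
      (fun (s : PySem.Dict Int (List Int) × PySem.Set Int × List Int) p =>
        if PySem.Set.contains (PySem.Set.ofList labels) p.2 then
          (s.1.insert p.2 (s.1.getD p.2 [] ++ [p.1]), PySem.Set.add s.2.1 p.1, s.2.2)
        else (s.1, s.2.1, s.2.2 ++ [p.2]))
      (PySem.Dict.empty, PySem.Set.empty, [])).1.getD k []).map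
        (fun i => (PySem.List.pyGet? X i).getD 0)) = pvPick k (X.zip y) := by
    intro k hk
    rw [pv_phase1_getD _ _ _ k ((PySem.Set.contains_iff _ _).mpr ((PySem.Set.mem_ofList _ _).mpr hk))]
    rw [PySem.Dict.getD_empty, List.nil_append, List.map_map]
    exact pv_pick_enum X y k (fun hmem => Hall k hmem hk)
  have h1 := pv_phase2 (fun i => (PySem.List.pyGet? X i).getD 0) labels _ (X.zip y) [] [] H
  have h2 := pv_phase1_rest (PySem.Set.ofList labels) (PySem.List.enumerate y)
      (PySem.Dict.empty, PySem.Set.empty, [])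
  have h3 := pv_restX X y labels Hall
  rw [h3, h2, List.nil_append, pv_resty_enum _ _ _ hWf, hfc, hfc]
  rw [Prod.ext_iff] at h1
  simp only at h1
  rw [h1.1, h1.2]

-- ===== VERDICT (by name: the statement is the Claim_ definition above) =====
theorem pickdrop_spec : Claim_equal_pickdrop := by
  unfold Claim_equal_pickdrop
  intro T labels _ hpre
  unfold Spec_pickdrop
  obtain ⟨X, y⟩ := T
  rw [pv_A_eq X y labels hpre, pv_B_eq X y labels hpre]
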